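-- pv_equiv track=rewrite | github.com/TGM-HWI-SWP/B.I.E.R | src/reports/report_b.py | _find_int_after_key
-- ===== SOURCE A (Python) =====
-- from typing import List, Dict, Optional, Tuple
--
-- def _find_int_after_key(details: str, key: str, allow_negative: bool = False) -> Optional[int]:
--     if not details:
--         return None
--     low = details.lower()
--     k = key.lower()
--     pos = low.find(k)
--     if pos == -1:
--         return None
--
--     start = pos + len(k)
--     s = details[start:]
--
--
--
--     i = 0
--     while i < len(s) and not (s[i].isdigit() or (allow_negative and s[i] == '-')):
--         i += 1
--     if i >= len(s):
--         return None
--     num_chars = []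
--     if allow_negative and s[i] == '-':
--         num_chars.append('-')
--         i += 1
--     while i < len(s) and s[i].isdigit():
--         num_chars.append(s[i])
--         i += 1
--     if not num_chars or (num_chars == ['-']):
--         return None
--     try:
--         return int(''.join(num_chars))
--     except Exception:
--         return None
-- ===== SOURCE B (Python) =====
-- import re
--
-- def _find_int_after_key(details: str, key: str, allow_negative: bool = False):
--     pos = details.lower().find(key.lower())
--     if pos == -1:
--         return None
--     s = details[pos + len(key):]
--     m = re.match(r'[^-\d]*(-?\d+)' if allow_negative else r'\D*(\d+)', s)
--     return int(m.group(1)) if m else None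
-- ===== Notes on version B (the rewrite author's own statement) =====
-- stated objective: idiomatic
-- what changed: A's two hand-written index loops (skip non-starters, then accumulate digit characters into a list and join) are replaced by a single anchored regex match re.match(r'[^-\d]*(-?\d+)') / re.match(r'\D*(\d+)') on the slice after the key, whose anchoring reproduces A's lone-'-' behaviour.
import Mathlib
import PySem

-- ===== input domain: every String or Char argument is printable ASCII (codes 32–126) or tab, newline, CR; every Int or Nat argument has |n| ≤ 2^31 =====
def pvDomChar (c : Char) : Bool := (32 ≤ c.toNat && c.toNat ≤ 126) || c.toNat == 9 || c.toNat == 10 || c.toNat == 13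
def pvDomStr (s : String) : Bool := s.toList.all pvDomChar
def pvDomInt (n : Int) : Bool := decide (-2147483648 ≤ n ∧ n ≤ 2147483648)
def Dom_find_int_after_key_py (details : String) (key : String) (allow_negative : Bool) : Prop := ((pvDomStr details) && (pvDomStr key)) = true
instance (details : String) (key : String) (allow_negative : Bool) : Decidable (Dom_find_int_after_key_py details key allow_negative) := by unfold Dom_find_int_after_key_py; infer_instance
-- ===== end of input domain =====

-- B replaces A's two hand-written index loops by one anchored regex match on the slice
-- after the key (objective: idiomatic); return values are proved equal on all inputs.

-- ===== PORT A =====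
-- A's first while loop: skip chars that are neither digits nor (when allowed) '-';
-- the index loop is rendered as structural recursion on the remaining characters.
def pvSkipA (an : Bool) : List Char → List Char
  | [] => []
  | c :: cs =>
    if !(PySem.Chars.isdigit c || (an && c == '-')) then pvSkipA an cs
    else c :: cs

-- A's second while loop: collect the run of digit characters.
def pvDigitsA : List Char → List Char
  | [] => []
  | c :: cs => if PySem.Chars.isdigit c then c :: pvDigitsA cs else []

def find_int_after_key_py (details : String) (key : String) (allow_negative : Bool) : Option Int :=
  if details.toList.length = 0 then none
  else
    let low := PySem.Str.lower details
    let k := PySem.Str.lower key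
    let pos := PySem.Str.find low k
    if pos == -1 then none
    else
      let s := PySem.List.slice details.toList (some (pos + (k.toList.length : Int))) none
      match pvSkipA allow_negative s with
      | [] => none    -- i >= len(s)
      | c :: rest =>
        let numChars := if allow_negative && c == '-' then '-' :: pvDigitsA rest
                        else pvDigitsA (c :: rest)
        if numChars = [] ∨ numChars = ['-'] then none
        else PySem.Int.ofChars? numChars    -- int(''.join(num_chars)), try/except -> Option

-- ===== PORT B =====
-- hand port (no regex engine in Lean) of re.match(r'[^-\d]*(-?\d+)', s) when allow_negative,
-- else re.match(r'\D*(\d+)', s), returning group(1): anchored greedy class skip, optional '-',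
-- then a digit run; the lone-'-'-without-digits case fails the whole anchored match.
-- \d / \D are ported as the Python digit test (exact on the ASCII domain).
def pvReIntGroup (an : Bool) (s : List Char) : Option (List Char) :=
  if an then
    match s.dropWhile (fun c => !(PySem.Chars.isdigit c || c == '-')) with
    | [] => none
    | c :: rest =>
      if c == '-' then
        match rest.takeWhile PySem.Chars.isdigit with
        | [] => none
        | ds => some ('-' :: ds)
      else some ((c :: rest).takeWhile PySem.Chars.isdigit)
  else
    match s.dropWhile (fun c => !PySem.Chars.isdigit c) with
    | [] => none
    | c :: rest => some ((c :: rest).takeWhile PySem.Chars.isdigit)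

def find_int_after_key_py_alt (details : String) (key : String) (allow_negative : Bool) : Option Int :=
  let pos := PySem.Str.find (PySem.Str.lower details) (PySem.Str.lower key)
  if pos == -1 then none
  else
    let s := PySem.List.slice details.toList (some (pos + (key.toList.length : Int))) none
    match pvReIntGroup allow_negative s with
    | none => none
    | some g => PySem.Int.ofChars? g    -- int(m.group(1))

-- ===== PRECONDITION & SPEC =====
def Spec_find_int_after_key_py (details : String) (key : String) (allow_negative : Bool) (out : Option Int) : Prop := out = find_int_after_key_py_alt details key allow_negative
instance (details : String) (key : String) (allow_negative : Bool) (out : Option Int) : Decidable (Spec_find_int_after_key_py details key allow_negative out) := by unfold Spec_find_int_after_key_py; infer_instance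

-- ===== CLAIM (what is proved, stated in full; the proofs are below) =====
def Claim_equal_find_int_after_key_py : Prop := ∀ (details : String) (key : String) (allow_negative : Bool), Dom_find_int_after_key_py details key allow_negative → Spec_find_int_after_key_py details key allow_negative (find_int_after_key_py details key allow_negative)

-- ===== LEMMAS AND PROOFS =====
theorem pvSkipA_eq_dropWhile (an : Bool) (s : List Char) :
    pvSkipA an s = s.dropWhile (fun c => !(PySem.Chars.isdigit c || (an && c == '-'))) := by
  induction s with
  | nil => rfl
  | cons c cs ih =>
    simp only [pvSkipA, List.dropWhile_cons]
    split <;> simp_all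

theorem pvDigitsA_eq_takeWhile (s : List Char) :
    pvDigitsA s = s.takeWhile PySem.Chars.isdigit := by
  induction s with
  | nil => rfl
  | cons c cs ih =>
    simp only [pvDigitsA, List.takeWhile_cons]
    split <;> simp_all

theorem pvHead_dropWhile {p : Char → Bool} {s : List Char} {c : Char} {rest : List Char}
    (h : s.dropWhile p = c :: rest) : p c = false := by
  induction s with
  | nil => simp at h
  | cons a as ih =>
    rw [List.dropWhile_cons] at h
    split at h
    · exact ih h
    · cases h; simp_all

-- ===== VERDICT (by name: the statement is the Claim_ definition above) =====
theorem find_int_after_key_py_spec : Claim_equal_find_int_after_key_py := by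
  intro details key an _
  unfold Spec_find_int_after_key_py
  unfold find_int_after_key_py find_int_after_key_py_alt
  dsimp only
  by_cases hd : details.toList.length = 0
  · -- empty details: A returns none early; B finds nothing in the empty slice
    have hnil : details.toList = [] := List.length_eq_zero_iff.mp hd
    rw [if_pos hd, hnil]
    split
    · rfl
    · rw [PySem.List.slice_some_none, List.drop_nil]
      cases an <;> simp [pvReIntGroup]
  · rw [if_neg hd]
    -- the lowered key has the same length as the key
    have hlen : (PySem.Str.lower key).toList.length = key.toList.length := by
      rw [PySem.Str.toList_lower, PySem.Chars.lower, List.length_map]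
    rw [hlen]
    split
    · rfl
    · -- key found; both sides work on the same slice s
      set s := PySem.List.slice details.toList
        (some (PySem.Str.find (PySem.Str.lower details) (PySem.Str.lower key)
          + (key.toList.length : Int))) none with hs
      rw [pvSkipA_eq_dropWhile]
      cases an with
      | false =>
        simp only [Bool.false_and, Bool.or_false, pvReIntGroup, Bool.false_eq_true, if_false]
        cases hdw : s.dropWhile (fun c => !PySem.Chars.isdigit c) with
        | nil => rfl
        | cons c rest =>
          have hc : PySem.Chars.isdigit c = true := by simpa using pvHead_dropWhile hdw
          have hcm : c ≠ '-' := fun h => by rw [h] at hc; exact absurd hc (by decide)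
          have hnc : pvDigitsA (c :: rest) = c :: rest.takeWhile PySem.Chars.isdigit := by
            rw [pvDigitsA_eq_takeWhile, List.takeWhile_cons, if_pos hc]
          simp only [hnc, List.takeWhile_cons, hc, if_true, reduceCtorEq, false_or,
            List.cons.injEq, hcm, false_and, if_false]
      | true =>
        simp only [Bool.true_and, pvReIntGroup, if_true]
        cases hdw : s.dropWhile (fun c => !(PySem.Chars.isdigit c || c == '-')) with
        | nil => rfl
        | cons c rest =>
          have hstop : (PySem.Chars.isdigit c || c == '-') = true := by
            have h := pvHead_dropWhile hdw
            simp only [Bool.not_eq_false'] at h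
            exact h
          by_cases hcm : c = '-'
          · subst hcm
            dsimp only
            rw [pvDigitsA_eq_takeWhile]
            cases rest.takeWhile PySem.Chars.isdigit <;> simp
          · have hceq : (c == '-') = false := beq_eq_false_iff_ne.mpr hcm
            have hc : PySem.Chars.isdigit c = true := by
              rcases Bool.or_eq_true_iff.mp hstop with h | h
              · exact h
              · rw [hceq] at h; exact absurd h (by decide)
            have hnc : pvDigitsA (c :: rest) = c :: rest.takeWhile PySem.Chars.isdigit := by
              rw [pvDigitsA_eq_takeWhile, List.takeWhile_cons, if_pos hc]
            simp [hnc, hceq, hcm, hc]
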